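-- pv_equiv track=rewrite | github.com/Dumi-coder/CeylonPulse | src/signal_detection/signal_detector.py | _check_source_specific
-- ===== SOURCE A (Python) =====
-- def _check_source_specific(signal_name: str, source: str, text: str) -> bool:
--     """
--     Check for source-specific signal detection
--     Based on SSD: CEB for power outages, NWSDB for water, etc.
--     """
--     source_lower = source.lower()
--     signal_lower = signal_name.lower()
--
--     # Power Outages from CEB
--     if "power outage" in signal_lower or "ceb" in signal_lower:
--         if "ceb" in source_lower or "electricity" in source_lower:
--             return True
--
--     # Water Supply from NWSDB
--     if "water supply" in signal_lower or "nwsdb" in signal_lower: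
--         if "nwsdb" in source_lower or "water board" in source_lower:
--             return True
--
--     # Met Department for weather signals
--     if any(term in signal_lower for term in ["rainfall", "flood", "cyclone", "heat", "drought", "landslide"]):
--         if "met" in source_lower or "meteorological" in source_lower or "weather" in source_lower:
--             return True
--
--     # Central Bank for economic signals
--     if any(term in signal_lower for term in ["inflation", "dollar rate", "currency"]):
--         if "central bank" in source_lower or "cbsl" in source_lower:
--             return True
--
--     # Parliament for policy signals
--     if any(term in signal_lower for term in ["policy", "cabinet", "parliament", "regulation"]):
--         if "parliament" in source_lower or "cabinet" in source_lower:
--             return True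
--
--     # Google Trends for tourism
--     if "tourism" in signal_lower and "google trends" in signal_lower:
--         if "google trends" in source_lower:
--             return True
--
--     return False
-- ===== SOURCE B (Python) =====
-- AGENCY_RULES = {
--     "ceb": (("power outage", "ceb"), False, ("ceb", "electricity")),
--     "nwsdb": (("water supply", "nwsdb"), False, ("nwsdb", "water board")),
--     "met": (("rainfall", "flood", "cyclone", "heat", "drought", "landslide"), False,
--             ("met", "meteorological", "weather")),
--     "cbsl": (("inflation", "dollar rate", "currency"), False, ("central bank", "cbsl")),
--     "parliament": (("policy", "cabinet", "parliament", "regulation"), False,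
--                    ("parliament", "cabinet")),
--     "google_trends": (("tourism", "google trends"), True, ("google trends",)),
-- }
--
--
-- def _check_source_specific(signal_name: str, source: str, text: str) -> bool:
--     sig = signal_name.lower()
--     src = source.lower()
--     # Stage 1: which agencies does the signal name point at?
--     signal_agencies = {a for a, (terms, need_all, _) in AGENCY_RULES.items()
--                        if (all(t in sig for t in terms) if need_all
--                            else any(t in sig for t in terms))}
--     # Stage 2: which agencies does the source look like?
--     source_agencies = {a for a, (_, _, terms) in AGENCY_RULES.items()
--                        if any(t in src for t in terms)}
--     # Match iff some agency appears on both sides.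
--     return not signal_agencies.isdisjoint(source_agencies)
-- ===== Notes on version B (the rewrite author's own statement) =====
-- stated objective: alternative
-- what changed: Instead of A's ordered cascade of per-rule if-blocks with early return, B classifies in two independent passes: it computes the set of agencies matched by the signal name and the set of agencies matched by the source, and returns whether the two sets intersect.
import Mathlib
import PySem

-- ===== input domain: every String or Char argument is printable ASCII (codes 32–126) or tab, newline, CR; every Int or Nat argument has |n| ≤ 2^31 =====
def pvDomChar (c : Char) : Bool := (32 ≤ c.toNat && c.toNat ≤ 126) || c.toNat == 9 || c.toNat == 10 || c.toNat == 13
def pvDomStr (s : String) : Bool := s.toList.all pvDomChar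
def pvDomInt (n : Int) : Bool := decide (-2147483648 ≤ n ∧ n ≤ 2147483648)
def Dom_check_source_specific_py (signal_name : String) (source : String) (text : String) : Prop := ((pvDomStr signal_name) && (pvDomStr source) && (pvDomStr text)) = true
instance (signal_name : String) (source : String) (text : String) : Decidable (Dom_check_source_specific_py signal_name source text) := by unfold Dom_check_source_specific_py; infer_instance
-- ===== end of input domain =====

-- B replaces A's ordered cascade of if-blocks by two independent classification passes
-- (agencies matched by the signal, agencies matched by the source) and a set intersection
-- (objective: alternative decomposition).

-- ===== PORT A =====
def check_source_specific_py (signal_name : String) (source : String) (text : String) : Bool :=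
  let source_lower := PySem.Str.lower source
  let signal_lower := PySem.Str.lower signal_name
  -- Power Outages from CEB
  if (PySem.Str.isIn "power outage" signal_lower || PySem.Str.isIn "ceb" signal_lower) &&
     (PySem.Str.isIn "ceb" source_lower || PySem.Str.isIn "electricity" source_lower) then true
  -- Water Supply from NWSDB
  else if (PySem.Str.isIn "water supply" signal_lower || PySem.Str.isIn "nwsdb" signal_lower) &&
     (PySem.Str.isIn "nwsdb" source_lower || PySem.Str.isIn "water board" source_lower) then true
  -- Met Department for weather signals
  else if (["rainfall", "flood", "cyclone", "heat", "drought", "landslide"].any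
        (fun term => PySem.Str.isIn term signal_lower)) &&
     (PySem.Str.isIn "met" source_lower || PySem.Str.isIn "meteorological" source_lower ||
      PySem.Str.isIn "weather" source_lower) then true
  -- Central Bank for economic signals
  else if (["inflation", "dollar rate", "currency"].any
        (fun term => PySem.Str.isIn term signal_lower)) &&
     (PySem.Str.isIn "central bank" source_lower || PySem.Str.isIn "cbsl" source_lower) then true
  -- Parliament for policy signals
  else if (["policy", "cabinet", "parliament", "regulation"].any
        (fun term => PySem.Str.isIn term signal_lower)) &&
     (PySem.Str.isIn "parliament" source_lower || PySem.Str.isIn "cabinet" source_lower) then true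
  -- Google Trends for tourism
  else if (PySem.Str.isIn "tourism" signal_lower && PySem.Str.isIn "google trends" signal_lower) &&
     PySem.Str.isIn "google trends" source_lower then true
  else false

-- ===== PORT B =====
-- Python dict AGENCY_RULES → association list in insertion order
def pvAgencyRules : List (String × (List String × Bool × List String)) :=
  [ ("ceb", (["power outage", "ceb"], false, ["ceb", "electricity"])),
    ("nwsdb", (["water supply", "nwsdb"], false, ["nwsdb", "water board"])),
    ("met", (["rainfall", "flood", "cyclone", "heat", "drought", "landslide"], false,
      ["met", "meteorological", "weather"])),
    ("cbsl", (["inflation", "dollar rate", "currency"], false, ["central bank", "cbsl"])),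
    ("parliament", (["policy", "cabinet", "parliament", "regulation"], false,
      ["parliament", "cabinet"])),
    ("google_trends", (["tourism", "google trends"], true, ["google trends"])) ]

def check_source_specific_py_alt (signal_name : String) (source : String) (text : String) : Bool :=
  let sig := PySem.Str.lower signal_name
  let src := PySem.Str.lower source
  -- Stage 1: agencies matched by the signal name (set comprehension; keys are distinct)
  let signal_agencies : List String :=
    (pvAgencyRules.filter (fun r =>
      if r.2.2.1 then r.2.1.all (fun t => PySem.Str.isIn t sig)
      else r.2.1.any (fun t => PySem.Str.isIn t sig))).map (·.1)
  -- Stage 2: agencies the source looks like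
  let source_agencies : List String :=
    (pvAgencyRules.filter (fun r =>
      r.2.2.2.any (fun t => PySem.Str.isIn t src))).map (·.1)
  -- not isdisjoint
  signal_agencies.any (fun a => source_agencies.contains a)

-- ===== PRECONDITION & SPEC =====
def Spec_check_source_specific_py (signal_name : String) (source : String) (text : String) (out : Bool) : Prop := out = check_source_specific_py_alt signal_name source text
instance (signal_name : String) (source : String) (text : String) (out : Bool) : Decidable (Spec_check_source_specific_py signal_name source text out) := by unfold Spec_check_source_specific_py; infer_instance

-- ===== CLAIM (what is proved, stated in full; the proofs are below) =====
def Claim_equal_check_source_specific_py : Prop := ∀ (signal_name : String) (source : String) (text : String), Dom_check_source_specific_py signal_name source text → Spec_check_source_specific_py signal_name source text (check_source_specific_py signal_name source text)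

-- ===== LEMMAS AND PROOFS =====

-- ===== VERDICT (by name: the statement is the Claim_ definition above) =====
theorem check_source_specific_py_spec : Claim_equal_check_source_specific_py := by
  intro signal_name source text _
  unfold Spec_check_source_specific_py check_source_specific_py check_source_specific_py_alt pvAgencyRules
  simp only [List.filter_cons, List.filter_nil, List.any_cons, List.any_nil, List.all_cons,
    List.all_nil, Bool.and_true, Bool.or_false, Bool.false_eq_true, Bool.or_assoc, if_true, if_false]
  generalize (PySem.Str.isIn "power outage" (PySem.Str.lower signal_name) ||
      PySem.Str.isIn "ceb" (PySem.Str.lower signal_name)) = S1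
  generalize (PySem.Str.isIn "water supply" (PySem.Str.lower signal_name) ||
      PySem.Str.isIn "nwsdb" (PySem.Str.lower signal_name)) = S2
  generalize (PySem.Str.isIn "rainfall" (PySem.Str.lower signal_name) ||
      (PySem.Str.isIn "flood" (PySem.Str.lower signal_name) ||
        (PySem.Str.isIn "cyclone" (PySem.Str.lower signal_name) ||
          (PySem.Str.isIn "heat" (PySem.Str.lower signal_name) ||
            (PySem.Str.isIn "drought" (PySem.Str.lower signal_name) ||
              PySem.Str.isIn "landslide" (PySem.Str.lower signal_name)))))) = S3
  generalize (PySem.Str.isIn "inflation" (PySem.Str.lower signal_name) ||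
      (PySem.Str.isIn "dollar rate" (PySem.Str.lower signal_name) ||
        PySem.Str.isIn "currency" (PySem.Str.lower signal_name))) = S4
  generalize (PySem.Str.isIn "policy" (PySem.Str.lower signal_name) ||
      (PySem.Str.isIn "cabinet" (PySem.Str.lower signal_name) ||
        (PySem.Str.isIn "parliament" (PySem.Str.lower signal_name) ||
          PySem.Str.isIn "regulation" (PySem.Str.lower signal_name)))) = S5
  generalize (PySem.Str.isIn "tourism" (PySem.Str.lower signal_name)) = T1
  generalize (PySem.Str.isIn "google trends" (PySem.Str.lower signal_name)) = T2
  generalize (PySem.Str.isIn "ceb" (PySem.Str.lower source) ||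
      PySem.Str.isIn "electricity" (PySem.Str.lower source)) = C1
  generalize (PySem.Str.isIn "nwsdb" (PySem.Str.lower source) ||
      PySem.Str.isIn "water board" (PySem.Str.lower source)) = C2
  generalize (PySem.Str.isIn "met" (PySem.Str.lower source) ||
      (PySem.Str.isIn "meteorological" (PySem.Str.lower source) ||
        PySem.Str.isIn "weather" (PySem.Str.lower source))) = C3
  generalize (PySem.Str.isIn "central bank" (PySem.Str.lower source) ||
      PySem.Str.isIn "cbsl" (PySem.Str.lower source)) = C4
  generalize (PySem.Str.isIn "parliament" (PySem.Str.lower source) ||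
      PySem.Str.isIn "cabinet" (PySem.Str.lower source)) = C5
  generalize (PySem.Str.isIn "google trends" (PySem.Str.lower source)) = C6
  revert S1 S2 S3 S4 S5 T1 T2 C1 C2 C3 C4 C5 C6
  decide
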